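-- pv_equiv track=rewrite | github.com/skiry/University | Fundamentals of Programming/Assignment03-04/Assignment04/functions.py | maxOnDay
-- ===== SOURCE A (Python) =====
-- def checkParam(param):
--     '''
--     checks if the sent parameter is either IN or OUT
--     '''
--     if param=='in' or param=='out':
--         return True
--     return False
--
-- def maxOnDay(listTr,typeOf,day):
--     '''
--     max out 15 – write the maximum out transaction on day 15.
--     with proper checkings
--     '''
--     maxim=0
--     zi=tip=0
--     if checkParam(typeOf):
--         if checkInteger(day) and validDay(int(day)):
--             for i in listTr:
--                 if int(i[0])==int(day):
--                     zi=1
--                     if i[2]==typeOf: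
--                         tip=1
--                         if maxim<i[1]:
--                             maxim=i[1]
--             if zi==0:
--                 return -1
--             elif zi and tip==0:
--                 return -2
--             else:
--                 return maxim
--         else:
--             return -3
--     else:
--         return -4
--
-- def checkInteger(param):
--     '''
--     checks if a parameter is an integer
--     '''
--     param=str(param)
--     return param.isdigit()
--
-- def validDay(day):
--     '''
--     checks if the DAY parameter is in the interval [1,31]
--     '''
--     if day>=1 and day<=31:
--         return True
--     return False
-- ===== SOURCE B (Python) =====
-- def maxOnDay(listTr, typeOf, day):
--     if typeOf not in ('in', 'out'):
--         return -4
--     if not (str(day).isdigit() and 1 <= int(day) <= 31):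
--         return -3
--     dayTr = [i for i in listTr if int(i[0]) == int(day)]
--     if not dayTr:
--         return -1
--     typeTr = [i for i in dayTr if i[2] == typeOf]
--     if not typeTr:
--         return -2
--     return max([0] + [i[1] for i in typeTr])
-- ===== Notes on version B (the rewrite author's own statement) =====
-- stated objective: simpler
-- what changed: Replaced the single pass with zi/tip flags and a running maximum by early-return guards plus two filtered lists whose emptiness decides -1/-2 and a max() over [0]+values.
import Mathlib
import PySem

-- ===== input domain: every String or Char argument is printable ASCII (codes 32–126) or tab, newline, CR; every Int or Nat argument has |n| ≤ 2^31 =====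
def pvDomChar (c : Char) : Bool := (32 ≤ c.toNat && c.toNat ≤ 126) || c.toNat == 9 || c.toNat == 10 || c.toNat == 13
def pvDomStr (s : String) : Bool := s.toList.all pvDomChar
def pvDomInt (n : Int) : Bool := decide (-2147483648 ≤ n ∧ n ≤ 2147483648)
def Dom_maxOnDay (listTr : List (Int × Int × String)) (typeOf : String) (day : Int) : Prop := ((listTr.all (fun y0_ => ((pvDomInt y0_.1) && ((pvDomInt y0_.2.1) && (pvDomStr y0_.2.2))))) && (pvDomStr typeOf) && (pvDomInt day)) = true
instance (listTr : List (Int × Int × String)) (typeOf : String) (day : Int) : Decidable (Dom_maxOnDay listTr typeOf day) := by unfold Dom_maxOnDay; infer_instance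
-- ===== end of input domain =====

-- B replaces A's one-pass loop with zi/tip flags by guard early-returns, two filters and a max over [0]+values (objective: simpler).

-- ===== PORT A =====
def checkParam (param : String) : Bool :=
  param == "in" || param == "out"

def checkInteger (param : Int) : Bool :=
  PySem.Str.strIsdigit (PySem.Int.toStr param)

def validDay (day : Int) : Bool :=
  decide (day ≥ 1 ∧ day ≤ 31)

-- the loop body of A, state (maxim, zi, tip)
def pvStepA (typeOf : String) (day : Int) (s : Int × Int × Int) (i : Int × Int × String) : Int × Int × Int :=
  if i.1 == day then
    if i.2.2 == typeOf then
      (if s.1 < i.2.1 then i.2.1 else s.1, 1, 1)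
    else (s.1, 1, s.2.2)
  else s

def maxOnDay (listTr : List (Int × Int × String)) (typeOf : String) (day : Int) : Int :=
  if checkParam typeOf then
    if checkInteger day && validDay day then
      let st := listTr.foldl (pvStepA typeOf day) (0, 0, 0)
      if st.2.1 == 0 then -1
      else if st.2.2 == 0 then -2
      else st.1
    else -3
  else -4

-- ===== PORT B =====
def maxOnDay_alt (listTr : List (Int × Int × String)) (typeOf : String) (day : Int) : Int :=
  if !(typeOf == "in" || typeOf == "out") then -4
  else if !(PySem.Str.strIsdigit (PySem.Int.toStr day) && decide (1 ≤ day ∧ day ≤ 31)) then -3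
  else
    let dayTr := listTr.filter (fun i => i.1 == day)
    if dayTr.isEmpty then -1
    else
      let typeTr := dayTr.filter (fun i => i.2.2 == typeOf)
      if typeTr.isEmpty then -2
      else (PySem.List.max? ((0 : Int) :: typeTr.map (fun i => i.2.1)) (fun y => y)).getD 0

-- ===== PRECONDITION & SPEC =====
def Spec_maxOnDay (listTr : List (Int × Int × String)) (typeOf : String) (day : Int) (out : Int) : Prop := out = maxOnDay_alt listTr typeOf day
instance (listTr : List (Int × Int × String)) (typeOf : String) (day : Int) (out : Int) : Decidable (Spec_maxOnDay listTr typeOf day out) := by unfold Spec_maxOnDay; infer_instance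

-- ===== CLAIM (what is proved, stated in full; the proofs are below) =====
def Claim_equal_maxOnDay : Prop := ∀ (listTr : List (Int × Int × String)) (typeOf : String) (day : Int), Dom_maxOnDay listTr typeOf day → Spec_maxOnDay listTr typeOf day (maxOnDay listTr typeOf day)

-- ===== LEMMAS AND PROOFS =====

-- characterisation of A's fold: maxim is the running max over the day+type matches,
-- zi / tip record non-emptiness of the day filter / day+type filter
theorem foldA_eq (typeOf : String) (day : Int) (l : List (Int × Int × String)) (s : Int × Int × Int) :
    l.foldl (pvStepA typeOf day) s =
      ((((l.filter (fun i => i.1 == day)).filter (fun i => i.2.2 == typeOf)).map (fun i => i.2.1)).foldl max s.1,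
       if (l.filter (fun i => i.1 == day)).isEmpty then s.2.1 else 1,
       if ((l.filter (fun i => i.1 == day)).filter (fun i => i.2.2 == typeOf)).isEmpty then s.2.2 else 1) := by
  induction l generalizing s with
  | nil => simp
  | cons x t ih =>
    rw [List.foldl_cons, ih]
    by_cases hd : x.1 = day
    · by_cases ht : x.2.2 = typeOf
      · have hmax : (if s.1 < x.2.1 then x.2.1 else s.1) = max s.1 x.2.1 := by
          by_cases h : s.1 < x.2.1 <;> simp [h] <;> omega
        simp only [pvStepA, hd, ht, beq_self_eq_true, if_true, hmax, List.filter_cons,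
          List.map_cons, List.foldl_cons, List.isEmpty_cons]
        simp
      · simp only [pvStepA, hd, beq_self_eq_true, if_true, List.filter_cons]
        have ht' : (x.2.2 == typeOf) = false := by simp [ht]
        simp only [ht', Bool.false_eq_true, if_false]
        simp
    · have hd' : (x.1 == day) = false := by simp [hd]
      simp only [pvStepA, hd', Bool.false_eq_true, if_false, List.filter_cons]

theorem maxOnDay_eq_alt (listTr : List (Int × Int × String)) (typeOf : String) (day : Int) :
    maxOnDay listTr typeOf day = maxOnDay_alt listTr typeOf day := by
  unfold maxOnDay maxOnDay_alt checkParam checkInteger validDay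
  cases hp : (typeOf == "in" || typeOf == "out")
  · simp
  · cases hg : (PySem.Str.strIsdigit (PySem.Int.toStr day) && decide (1 ≤ day ∧ day ≤ 31))
    · simp
    · have hg2 : (PySem.Str.strIsdigit (PySem.Int.toStr day) && decide (day ≥ 1 ∧ day ≤ 31)) = true := by
        simpa using hg
      simp only [foldA_eq, Bool.not_true, Bool.false_eq_true, if_false,
        PySem.List.max?_id_cons]
      by_cases hday : (listTr.filter (fun i => i.1 == day)).isEmpty
      · have hty : ((listTr.filter (fun i => i.1 == day)).filter (fun i => i.2.2 == typeOf)).isEmpty = true := by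
          rw [List.isEmpty_iff] at hday ⊢; simp [hday]
        simp only [hday, hty, if_true]
        norm_num
      · have hday' : (listTr.filter (fun i => i.1 == day)).isEmpty = false := by
          simpa using hday
        by_cases hty : ((listTr.filter (fun i => i.1 == day)).filter (fun i => i.2.2 == typeOf)).isEmpty
        · simp only [hday', hty, if_true, Bool.false_eq_true, if_false]
          norm_num
        · have hty' : ((listTr.filter (fun i => i.1 == day)).filter (fun i => i.2.2 == typeOf)).isEmpty = false := by
            simpa using hty
          simp only [hday', hty', Bool.false_eq_true, if_false, Option.getD_some]
          norm_num

-- ===== VERDICT (by name: the statement is the Claim_ definition above) =====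
theorem maxOnDay_spec : Claim_equal_maxOnDay := by
  intro listTr typeOf day _
  exact maxOnDay_eq_alt listTr typeOf day
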